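-- pv_equiv track=rewrite | github.com/akankshaty/Leetcode | MultiplyWithoutop.py | helper
-- ===== SOURCE A (Python) =====
-- def helper(small,big):
--     if small == 0:
--         return 0
--     if small == 1:
--         return big
--
--     s = small >> 1
--     halfprod = helper(s,big)
--     if small%2 == 0:
--         return halfprod + halfprod
--     else:
--         return halfprod + halfprod + big
-- ===== SOURCE B (Python) =====
-- def helper(small, big):
--     result = 0
--     while small > 0:
--         if small & 1:
--             result += big
--         big += big
--         small >>= 1
--     return result
-- ===== Notes on version B (the rewrite author's own statement) =====
-- stated objective: idiomatic
-- what changed: Replaced the top-down halving recursion by an iterative Russian-peasant loop (accumulator + doubling big, shifting small), removing recursion entirely.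
import Mathlib
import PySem

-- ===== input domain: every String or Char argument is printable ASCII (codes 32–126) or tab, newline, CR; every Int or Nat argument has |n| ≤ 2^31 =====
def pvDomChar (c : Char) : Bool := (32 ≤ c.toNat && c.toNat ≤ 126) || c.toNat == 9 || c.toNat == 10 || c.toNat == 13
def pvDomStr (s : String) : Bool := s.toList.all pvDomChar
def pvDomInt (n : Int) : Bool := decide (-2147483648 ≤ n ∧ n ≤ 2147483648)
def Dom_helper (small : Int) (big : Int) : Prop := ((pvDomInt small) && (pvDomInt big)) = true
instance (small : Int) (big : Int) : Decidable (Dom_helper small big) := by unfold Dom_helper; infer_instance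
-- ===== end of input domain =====

-- B replaces A's halving recursion by an iterative Russian-peasant loop (idiomatic; same cost).

-- ===== PORT A =====
-- Python 'small >> 1' is floor division by 2 (exact: PySem.Int.floordiv small 2).
-- On small < 0 Python recurses forever (-1 >> 1 == -1) and raises RecursionError;
-- those inputs are outside Pre_helper, and the port returns 0 there only to be total.
def helper (small : Int) (big : Int) : Int :=
  if small = 0 then 0
  else if small = 1 then big
  else if small < 0 then 0  -- unreachable under Pre_helper (Python: RecursionError)
  else
    let s := PySem.Int.floordiv small 2
    let halfprod := helper s big
    if PySem.Int.mod small 2 = 0 then halfprod + halfprod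
    else halfprod + halfprod + big
termination_by small.toNat
decreasing_by
  have h2 : (2:Int) ≤ small := by omega
  have := PySem.Int.floordiv_eq_ediv_of_pos (a := small) (b := 2) (by omega)
  simp only [this]
  omega

-- ===== PORT B =====
-- Loop state (small, big, result); 'small & 1' tested as mod 2 ≠ 0 (small > 0 in the loop);
-- 'small >>= 1' is floor division by 2.
def helperAltLoop (small : Int) (big : Int) (result : Int) : Int :=
  if small > 0 then
    let result' := if PySem.Int.mod small 2 ≠ 0 then result + big else result
    helperAltLoop (PySem.Int.floordiv small 2) (big + big) result'
  else result
termination_by small.toNat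
decreasing_by
  have := PySem.Int.floordiv_eq_ediv_of_pos (a := small) (b := 2) (by omega)
  simp only [this]
  omega

def helper_alt (small : Int) (big : Int) : Int :=
  helperAltLoop small big 0

-- ===== PRECONDITION & SPEC =====
-- Pre_ excludes small < 0, on which A recurses forever and raises RecursionError.
def Pre_helper (small : Int) (big : Int) : Prop := 0 ≤ small
instance (small : Int) (big : Int) : Decidable (Pre_helper small big) := by unfold Pre_helper; infer_instance
def pvWitness_helper : Int × Int := (6, 7)
def Spec_helper (small : Int) (big : Int) (out : Int) : Prop := out = helper_alt small big
instance (small : Int) (big : Int) (out : Int) : Decidable (Spec_helper small big out) := by unfold Spec_helper; infer_instance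

-- ===== CLAIM (what is proved, stated in full; the proofs are below) =====
def Claim_equal_helper : Prop := ∀ (small : Int) (big : Int), Dom_helper small big → Pre_helper small big → Spec_helper small big (helper small big)

-- ===== LEMMAS AND PROOFS =====

theorem helper_eq_mul (small big : Int) (h : 0 ≤ small) : helper small big = small * big := by
  by_cases h0 : small = 0
  · simp [helper, h0]
  · by_cases h1 : small = 1
    · simp [helper, h1]
    · have h2 : (2:Int) ≤ small := by omega
      have hfd := PySem.Int.floordiv_eq_ediv_of_pos (a := small) (b := 2) (by omega)
      have hmd := PySem.Int.mod_eq_emod_of_pos (a := small) (b := 2) (by omega)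
      have hs : 0 ≤ small / 2 := by omega
      have ih := helper_eq_mul (small / 2) big hs
      rw [helper]
      simp only [h0, h1, if_false, if_neg (by omega : ¬ small < 0), hfd, hmd, ih]
      have h02 : small % 2 = 0 ∨ small % 2 = 1 := Int.emod_two_eq_zero_or_one small
      rcases h02 with he | he <;> simp [he]
      · have hd : 2 * (small / 2) = small := by omega
        linear_combination big * hd
      · have hd : 2 * (small / 2) + 1 = small := by omega
        linear_combination big * hd
termination_by small.toNat
decreasing_by omega

theorem helperAltLoop_eq (small big result : Int) (h : 0 ≤ small) :
    helperAltLoop small big result = result + small * big := by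
  by_cases hp : small > 0
  · have hfd := PySem.Int.floordiv_eq_ediv_of_pos (a := small) (b := 2) (by omega)
    have hmd := PySem.Int.mod_eq_emod_of_pos (a := small) (b := 2) (by omega)
    have hs : 0 ≤ small / 2 := by omega
    rw [helperAltLoop]
    simp only [hp, if_pos, hfd, hmd]
    rw [helperAltLoop_eq (small / 2) (big + big) _ hs]
    have h02 : small % 2 = 0 ∨ small % 2 = 1 := Int.emod_two_eq_zero_or_one small
    rcases h02 with he | he <;> simp [he]
    · have hd : 2 * (small / 2) = small := by omega
      linear_combination big * hd
    · have hd : 2 * (small / 2) + 1 = small := by omega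
      linear_combination big * hd
  · rw [helperAltLoop]
    have h0 : small = 0 := by omega
    simp [h0]
termination_by small.toNat
decreasing_by omega

-- ===== VERDICT (by name: the statement is the Claim_ definition above) =====
theorem helper_spec : Claim_equal_helper := by
  intro small big _ hpre
  unfold Spec_helper helper_alt
  rw [helper_eq_mul small big hpre, helperAltLoop_eq small big 0 hpre]
  ring
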